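-- pv_equiv track=rewrite | github.com/crawl/crawl | crawl-ref/source/webserver/webtiles/ws_handler.py | list_of_names
-- ===== SOURCE A (Python) =====
-- import collections
--
-- def list_of_names(l):
--     result = []
--     try:
--         c = collections.Counter(l)
--         for n in sorted(c.keys()):
--             result.append(n)
--             if c[n] > 1:
--                 result[-1] += " (x%d)" % c[n]
--     except:
--         pass # backwards compat, py2 doesn't have collections.Counter
--     return ", ".join(result)
-- ===== SOURCE B (Python) =====
-- def list_of_names(l):
--     s = sorted(l)
--     parts = []
--     i = 0
--     while i < len(s):
--         n = s[i]
--         c = 1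
--         while i + c < len(s) and s[i + c] == n:
--             c += 1
--         parts.append(n + " (x%d)" % c if c > 1 else n)
--         i += c
--     return ", ".join(parts)
-- ===== Notes on version B (the rewrite author's own statement) =====
-- stated objective: alternative
-- what changed: Replaces Counter-then-sort-the-unique-keys (hash counting, then formatting via dict lookups) by sorting the whole list once and scanning consecutive equal runs, deriving each count from the run length.
import Mathlib
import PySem

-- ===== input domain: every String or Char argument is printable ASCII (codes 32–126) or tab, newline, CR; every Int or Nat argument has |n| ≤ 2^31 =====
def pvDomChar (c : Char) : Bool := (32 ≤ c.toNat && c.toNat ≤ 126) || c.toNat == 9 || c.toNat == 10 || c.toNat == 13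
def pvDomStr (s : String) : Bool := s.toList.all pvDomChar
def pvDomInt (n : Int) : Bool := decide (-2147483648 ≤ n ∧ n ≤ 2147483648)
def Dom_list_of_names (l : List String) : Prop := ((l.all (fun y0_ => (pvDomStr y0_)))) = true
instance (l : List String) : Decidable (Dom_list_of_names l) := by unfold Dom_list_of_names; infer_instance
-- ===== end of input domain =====

-- B replaces Counter-then-sort-the-keys by sort-the-whole-list-then-scan-consecutive-runs:
-- an alternative decomposition of the same task; the return values are proved equal.

-- ===== PORT A =====
def list_of_names (l : List String) : String :=
  let c := PySem.Dict.counter l          -- c = collections.Counter(l); never raises on a list of strings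
  let result := (PySem.List.sorted c.keys (fun x => x) false).foldl
    (fun result n =>
      let result := result ++ [n]        -- result.append(n)
      if c.getD n 0 > 1 then             -- if c[n] > 1: result[-1] += " (x%d)" % c[n]
        result.dropLast ++ [result.getLastD "" ++ " (x" ++ PySem.Int.toStr (c.getD n 0) ++ ")"]
      else result) []
  PySem.Str.join ", " result

-- ===== PORT B =====
-- the outer while loop of Source B: each iteration reads the run of s[i] (length c), appends the
-- formatted entry and jumps i past the run; consuming the run from the front of the remaining
-- suffix is the same computation.
def list_of_names_alt_go (s : List String) : List String :=
  match s with
  | [] => []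
  | n :: xs =>
    let c : Int := 1 + (xs.takeWhile (fun x => x == n)).length
    (if c > 1 then n ++ " (x" ++ PySem.Int.toStr c ++ ")" else n) ::
      list_of_names_alt_go (xs.dropWhile (fun x => x == n))
termination_by s.length
decreasing_by simpa using Nat.lt_succ_of_le (List.length_dropWhile_le _ _)

def list_of_names_alt (l : List String) : String :=
  PySem.Str.join ", " (list_of_names_alt_go (PySem.List.sorted l (fun x => x) false))

-- ===== PRECONDITION & SPEC =====
def Spec_list_of_names (l : List String) (out : String) : Prop := out = list_of_names_alt l
instance (l : List String) (out : String) : Decidable (Spec_list_of_names l out) := by unfold Spec_list_of_names; infer_instance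

-- ===== CLAIM (what is proved, stated in full; the proofs are below) =====
def Claim_equal_list_of_names : Prop := ∀ (l : List String), Dom_list_of_names l → Spec_list_of_names l (list_of_names l)

-- ===== LEMMAS AND PROOFS =====

-- the formatted entry for a name with count k
def pvFmt (k : Int) (n : String) : String :=
  if k > 1 then n ++ " (x" ++ PySem.Int.toStr k ++ ")" else n

-- the distinct names in the order B's scan meets them (first element of each run)
def pvKeys (s : List String) : List String :=
  match s with
  | [] => []
  | n :: xs => n :: pvKeys (xs.dropWhile (fun x => x == n))
termination_by s.length
decreasing_by simpa using Nat.lt_succ_of_le (List.length_dropWhile_le _ _)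

theorem pvKeys_mem (s : List String) (x : String) : x ∈ pvKeys s ↔ x ∈ s := by
  induction s using pvKeys.induct with
  | case1 => simp [pvKeys]
  | case2 n xs ih =>
    rw [pvKeys]
    simp only [List.mem_cons, ih]
    constructor
    · rintro (rfl | h)
      · exact .inl rfl
      · exact .inr ((List.dropWhile_sublist _).subset h)
    · rintro (rfl | h)
      · exact .inl rfl
      · rw [← List.takeWhile_append_dropWhile (p := fun x => x == n) (l := xs)] at h
        rcases List.mem_append.1 h with h | h
        · exact .inl (by simpa using List.mem_takeWhile_imp h)
        · exact .inr h

theorem pvNotMemDrop (n : String) (xs : List String)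
    (h1 : ∀ x ∈ xs, n ≤ x) (h2 : xs.Pairwise (· ≤ ·)) :
    n ∉ xs.dropWhile (fun x => x == n) := by
  induction xs with
  | nil => simp
  | cons a r ih =>
    rw [List.dropWhile_cons]
    by_cases hae : (a == n) = true
    · simp only [hae, if_true]
      exact ih (fun x hx => h1 x (.tail _ hx)) h2.tail
    · simp only [hae, if_neg Bool.false_ne_true]
      intro hmem
      rcases List.mem_cons.1 hmem with heq | hr
      · exact hae (by simp [heq])
      · have hna : n ≤ a := h1 a (.head _)
        have han : a ≤ n := (List.pairwise_cons.1 h2).1 n hr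
        exact hae (by simp [le_antisymm han hna])

theorem pvKeys_pairwise (s : List String) (hs : s.Pairwise (· ≤ ·)) :
    (pvKeys s).Pairwise (· < ·) := by
  induction s using pvKeys.induct with
  | case1 => simp [pvKeys]
  | case2 n xs ih =>
    have hx : ∀ x ∈ xs, n ≤ x := (List.pairwise_cons.1 hs).1
    have hxs : xs.Pairwise (· ≤ ·) := (List.pairwise_cons.1 hs).2
    have hd : (xs.dropWhile (fun x => x == n)).Pairwise (· ≤ ·) :=
      hxs.sublist (List.dropWhile_sublist _)
    rw [pvKeys, List.pairwise_cons]
    refine ⟨fun y hy => ?_, ih hd⟩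
    have hyd : y ∈ xs.dropWhile (fun x => x == n) := (pvKeys_mem _ _).1 hy
    have hle : n ≤ y := hx y ((List.dropWhile_sublist _).subset hyd)
    have hne : n ≠ y := fun h => pvNotMemDrop n xs hx hxs (h ▸ hyd)
    exact lt_of_le_of_ne hle hne

theorem pvCountRun (n : String) (xs : List String)
    (h1 : ∀ x ∈ xs, n ≤ x) (h2 : xs.Pairwise (· ≤ ·)) :
    ((n :: xs).count n : Int) = 1 + ((xs.takeWhile (fun x => x == n)).length : Int) := by
  have hsplit := List.takeWhile_append_dropWhile (p := fun x => x == n) (l := xs)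
  have ht : (xs.takeWhile (fun x => x == n)).count n
      = (xs.takeWhile (fun x => x == n)).length := by
    rw [List.count_eq_length]
    intro b hb
    exact (beq_iff_eq.1 (List.mem_takeWhile_imp (p := fun x => x == n) hb)).symm
  have hd : (xs.dropWhile (fun x => x == n)).count n = 0 :=
    List.count_eq_zero.2 (pvNotMemDrop n xs h1 h2)
  have hx : xs.count n = (xs.takeWhile (fun x => x == n)).length := by
    conv_lhs => rw [← hsplit]
    rw [List.count_append, ht, hd, Nat.add_zero]
  rw [List.count_cons_self, hx]
  push_cast
  ring

theorem pvGo_eq_map (s : List String) (hs : s.Pairwise (· ≤ ·)) :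
    list_of_names_alt_go s = (pvKeys s).map (fun n => pvFmt (s.count n) n) := by
  induction s using pvKeys.induct with
  | case1 => simp [pvKeys, list_of_names_alt_go]
  | case2 n xs ih =>
    have hx : ∀ x ∈ xs, n ≤ x := (List.pairwise_cons.1 hs).1
    have hxs : xs.Pairwise (· ≤ ·) := (List.pairwise_cons.1 hs).2
    have hd : (xs.dropWhile (fun x => x == n)).Pairwise (· ≤ ·) :=
      hxs.sublist (List.dropWhile_sublist _)
    rw [list_of_names_alt_go, pvKeys, List.map_cons, ih hd]
    have hc := pvCountRun n xs hx hxs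
    rw [hc]
    refine congrArg₂ _ rfl (List.map_congr_left fun m hm => ?_)
    have hmd : m ∈ xs.dropWhile (fun x => x == n) := (pvKeys_mem _ _).1 hm
    have hmn : m ≠ n := fun h => pvNotMemDrop n xs hx hxs (h ▸ hmd)
    have h1 : (n :: xs).count m = xs.count m := by
      rw [List.count_cons_of_ne (Ne.symm hmn)]
    have h2 : (xs.takeWhile (fun x => x == n)).count m = 0 := by
      rw [List.count_eq_zero]
      intro hmem
      exact hmn (by simpa using List.mem_takeWhile_imp hmem)
    have hsplit := List.takeWhile_append_dropWhile (p := fun x => x == n) (l := xs)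
    have h3 : xs.count m = (xs.dropWhile (fun x => x == n)).count m := by
      conv_lhs => rw [← hsplit]
      rw [List.count_append, h2, Nat.zero_add]
    rw [h1, h3]

theorem pvFoldA (l : List String) (xs r : List String) :
    xs.foldl (fun result n =>
      let result := result ++ [n]
      if (PySem.Dict.counter l).getD n 0 > 1 then
        result.dropLast ++ [result.getLastD "" ++ " (x" ++ PySem.Int.toStr ((PySem.Dict.counter l).getD n 0) ++ ")"]
      else result) r
    = r ++ xs.map (fun n => pvFmt (l.count n) n) := by
  induction xs generalizing r with
  | nil => simp
  | cons a t ih =>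
    rw [List.foldl_cons, ih]
    simp only [List.dropLast_concat, List.getLastD_concat, PySem.Dict.getD_counter, pvFmt,
      List.map_cons]
    by_cases h : ((l.count a : Int) > 1)
    · rw [if_pos h, if_pos h]
      simp
    · rw [if_neg h, if_neg h]
      simp

theorem pvA_eq (l : List String) :
    list_of_names l
      = PySem.Str.join ", " ((PySem.List.sorted (PySem.Set.ofList l) (fun x => x) false).map
          (fun n => pvFmt (l.count n) n)) := by
  rw [list_of_names]
  rw [pvFoldA l]
  rw [PySem.Dict.keys_counter, List.nil_append]

theorem pvB_eq (l : List String) :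
    list_of_names_alt l
      = PySem.Str.join ", " ((PySem.List.sorted (PySem.Set.ofList l) (fun x => x) false).map
          (fun n => pvFmt (l.count n) n)) := by
  have hp : (PySem.List.sorted l (fun x => x) false).Pairwise (· ≤ ·) :=
    PySem.List.sorted_pairwise l (fun x => x)
  rw [list_of_names_alt, pvGo_eq_map _ hp]
  have hcnt : ∀ n, (PySem.List.sorted l (fun x => x) false).count n = l.count n :=
    fun n => (PySem.List.sorted_perm l (fun x => x) false).count_eq n
  have hkeys : PySem.List.sorted (PySem.Set.ofList l) (fun x => x) false
      = pvKeys (PySem.List.sorted l (fun x => x) false) := by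
    apply PySem.List.sorted_eq_of_perm_of_pairwise_lt
    · apply (List.perm_ext_iff_of_nodup ?_ ?_).2
      · intro x
        rw [pvKeys_mem, PySem.List.mem_sorted, PySem.Set.mem_ofList]
      · exact (pvKeys_pairwise _ hp).imp ne_of_lt
      · exact PySem.Set.nodup_ofList l
    · exact pvKeys_pairwise _ hp
  rw [hkeys]
  exact congrArg _ (List.map_congr_left fun m _ => by rw [hcnt])

-- ===== VERDICT (by name: the statement is the Claim_ definition above) =====
theorem list_of_names_spec : Claim_equal_list_of_names := by
  intro l _
  unfold Spec_list_of_names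
  rw [pvA_eq, pvB_eq]
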